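-- pv_equiv track=rewrite | github.com/Data-MaSTeRR/codetree-TILs | 241011/Time to Time/time-to-time.py | cum_times
-- ===== SOURCE A (Python) =====
-- def cum_times(x, y):
--
--     h = 0
--     m = 0
--
--     cum_min = 0
--     while True:
--
--         if h == x and m == y:
--             break
--
--         m += 1
--         cum_min += 1
--
--         if m == 60:
--             h += 1
--             m = 0
--
--     return cum_min
-- ===== SOURCE B (Python) =====
-- def cum_times(x, y):
--     return x * 60 + y
-- ===== Notes on version B (the rewrite author's own statement) =====
-- stated objective: simpler
-- what changed: Replaced the minute-by-minute counting loop with the closed form x*60+y.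
import Mathlib
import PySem

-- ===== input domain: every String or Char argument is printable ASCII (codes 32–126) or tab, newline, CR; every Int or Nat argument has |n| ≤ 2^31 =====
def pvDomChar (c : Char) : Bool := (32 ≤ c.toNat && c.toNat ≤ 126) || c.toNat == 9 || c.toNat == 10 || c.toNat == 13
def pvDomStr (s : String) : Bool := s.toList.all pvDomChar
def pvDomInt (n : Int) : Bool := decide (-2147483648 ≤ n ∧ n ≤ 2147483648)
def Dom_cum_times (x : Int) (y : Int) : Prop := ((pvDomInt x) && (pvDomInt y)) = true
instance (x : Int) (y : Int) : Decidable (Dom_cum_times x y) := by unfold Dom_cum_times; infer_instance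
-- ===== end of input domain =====

-- B replaces A's minute-by-minute simulation loop with the closed form x*60+y (simpler).


-- ===== PORT A =====
-- A is an unbounded 'while True' loop; ported with a fuel parameter large enough to
-- cover every terminating run (fuel exhaustion can only occur outside Pre_, where the
-- Python loop never terminates).
def cumLoop : Nat → Int → Int → Int → Int → Int → Int
  | 0, _, _, _, _, cum => cum
  | (f+1), x, y, h, m, cum =>
    if h = x ∧ m = y then cum
    else
      let m' := m + 1
      let cum' := cum + 1
      if m' = 60 then cumLoop f x y (h+1) 0 cum'
      else cumLoop f x y h m' cum'

def cum_times (x : Int) (y : Int) : Int :=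
  cumLoop ((60 * x + y).toNat + 1) x y 0 0 0

-- ===== PORT B =====
def cum_times_alt (x : Int) (y : Int) : Int := x * 60 + y

-- ===== PRECONDITION & SPEC =====
-- Pre_ excludes exactly the inputs on which A's 'while True' loop never terminates:
-- the loop state only ever visits h ≥ 0 and 0 ≤ m < 60, so it reaches (x, y) iff
-- 0 ≤ x and 0 ≤ y < 60.
def Pre_cum_times (x : Int) (y : Int) : Prop := 0 ≤ x ∧ 0 ≤ y ∧ y < 60
instance (x : Int) (y : Int) : Decidable (Pre_cum_times x y) := by unfold Pre_cum_times; infer_instance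
def pvWitness_cum_times : Int × Int := (3, 25)

def Spec_cum_times (x : Int) (y : Int) (out : Int) : Prop := out = cum_times_alt x y
instance (x : Int) (y : Int) (out : Int) : Decidable (Spec_cum_times x y out) := by unfold Spec_cum_times; infer_instance

-- ===== CLAIM (what is proved, stated in full; the proofs are below) =====
def Claim_equal_cum_times : Prop := ∀ (x : Int) (y : Int), Dom_cum_times x y → Pre_cum_times x y → Spec_cum_times x y (cum_times x y)

-- ===== LEMMAS AND PROOFS =====

-- Loop invariant: cum = 60*h + m with 0 ≤ h, 0 ≤ m < 60; with enough fuel the loop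
-- returns 60*x + y.
theorem cumLoop_invariant (f : Nat) :
    ∀ (x y h m cum : Int), 0 ≤ h → 0 ≤ m → m < 60 → 0 ≤ y → y < 60 →
    cum = 60 * h + m → 60 * h + m ≤ 60 * x + y →
    (60 * x + y - cum).toNat < f →
    cumLoop f x y h m cum = 60 * x + y := by
  induction f with
  | zero => intro x y h m cum _ _ _ _ _ _ _ hf; omega
  | succ f ih =>
    intro x y h m cum hh hm0 hm60 hy0 hy60 hcum hle hf
    rw [cumLoop]
    by_cases hend : h = x ∧ m = y
    · simp only [hend, and_self, if_true]
      omega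
    · simp only [hend, if_false]
      have hlt : 60 * h + m < 60 * x + y := by
        rcases lt_or_eq_of_le hle with h1 | h1
        · exact h1
        · exfalso; apply hend; constructor <;> omega
      by_cases h60 : m + 1 = 60
      · simp only [h60, if_true]
        exact ih x y (h+1) 0 (cum+1) (by omega) (by omega) (by omega) hy0 hy60
          (by omega) (by omega) (by omega)
      · simp only [h60, if_false]
        exact ih x y h (m+1) (cum+1) hh (by omega) (by omega) hy0 hy60
          (by omega) (by omega) (by omega)

-- ===== VERDICT (by name: the statement is the Claim_ definition above) =====
theorem cum_times_spec : Claim_equal_cum_times := by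
  intro x y _ hpre
  obtain ⟨hx, hy0, hy60⟩ := hpre
  unfold Spec_cum_times cum_times cum_times_alt
  rw [cumLoop_invariant ((60 * x + y).toNat + 1) x y 0 0 0
      le_rfl le_rfl (by omega) hy0 hy60 (by ring) (by omega) (by omega)]
  ring
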